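-- pv_equiv track=rewrite | github.com/andreis/aoc | 2025/10.py | part1
-- ===== SOURCE A (Python) =====
-- from itertools import combinations
-- from functools import reduce
-- from operator import xor
--
-- def part1(targets, buttons):
--     total = 0
--     for target, buttons in zip(targets, buttons):
--         for k in range(len(buttons) + 1):
--             if any(reduce(xor, c, 0) == target for c in combinations(buttons, k)):
--                 total += k
--                 break
--     return total
-- ===== SOURCE B (Python) =====
-- def _subset_xors(bs):
--     # all subsets of bs as (xor-value, size) pairs, built by doubling
--     acc = [(0, 0)]
--     for b in bs:
--         acc = acc + [(v ^ b, s + 1) for v, s in acc]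
--     return acc
--
--
-- def part1(targets, buttons):
--     # meet in the middle: enumerate subset XORs of each half, join via a hash map of minimal sizes
--     total = 0
--     for target, btns in zip(targets, buttons):
--         h = len(btns) // 2
--         rbest = {}
--         for v, s in _subset_xors(btns[h:]):
--             if v not in rbest or s < rbest[v]:
--                 rbest[v] = s
--         best = None
--         for v, s in _subset_xors(btns[:h]):
--             t = rbest.get(target ^ v)
--             if t is not None and (best is None or s + t < best):
--                 best = s + t
--         if best is not None:
--             total += best
--     return total
-- ===== Notes on version B (the rewrite author's own statement) =====
-- stated objective: faster
-- what changed: Replaced the per-size itertools.combinations scan (re-enumerating all subsets for each candidate size k until a match) with meet-in-the-middle: enumerate subset XORs of each half of the button list once, store minimal subset sizes of the right half in a hash map, and join with the left half's subset XORs via lookups of target^v.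
import Mathlib
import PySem

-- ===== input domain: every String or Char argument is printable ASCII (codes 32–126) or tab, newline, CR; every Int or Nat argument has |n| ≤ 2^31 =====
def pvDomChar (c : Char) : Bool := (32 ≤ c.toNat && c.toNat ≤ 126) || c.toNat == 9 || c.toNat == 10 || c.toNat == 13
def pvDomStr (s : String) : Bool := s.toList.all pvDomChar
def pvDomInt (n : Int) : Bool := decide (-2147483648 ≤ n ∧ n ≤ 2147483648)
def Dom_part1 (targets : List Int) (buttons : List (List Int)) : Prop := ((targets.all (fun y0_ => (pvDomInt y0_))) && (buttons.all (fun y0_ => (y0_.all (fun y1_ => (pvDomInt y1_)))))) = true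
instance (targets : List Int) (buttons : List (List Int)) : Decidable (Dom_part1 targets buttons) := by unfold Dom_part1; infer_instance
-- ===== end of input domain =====

-- B replaces the per-size combinations scan with meet-in-the-middle over the two halves of the button list (measured asymptotically faster).


-- ===== PORT A =====
-- reduce(xor, c, 0) is the foldl; the for-k loop with break is find? over range(len+1)
def part1 (targets : List Int) (buttons : List (List Int)) : Int :=
  (targets.zip buttons).foldl
    (fun total tb =>
      match (PySem.List.pyRange 0 ((tb.2.length : Int) + 1) 1).find?
              (fun k => (PySem.List.combinations tb.2 k.toNat).any
                (fun c => c.foldl (fun a x => PySem.Int.bxor a x) 0 == tb.1)) with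
      | some k => total + k
      | none => total)
    0

-- ===== PORT B =====
-- _subset_xors: all subsets as (xor, size) pairs, built by doubling
def subsetXors (bs : List Int) : List (Int × Int) :=
  bs.foldl (fun acc b => acc ++ acc.map (fun p => (PySem.Int.bxor p.1 b, p.2 + 1))) [(0, 0)]

def part1_alt (targets : List Int) (buttons : List (List Int)) : Int :=
  (targets.zip buttons).foldl
    (fun total tb =>
      let btns := tb.2
      let h : Int := PySem.Int.floordiv (btns.length : Int) 2
      let rbest : PySem.Dict Int Int :=
        (subsetXors (PySem.List.slice btns (some h) none)).foldl
          (fun d p =>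
            match d.get? p.1 with
            | none => d.insert p.1 p.2
            | some t => if p.2 < t then d.insert p.1 p.2 else d)
          PySem.Dict.empty
      let best : Option Int :=
        (subsetXors (PySem.List.slice btns none (some h))).foldl
          (fun best p =>
            match rbest.get? (PySem.Int.bxor tb.1 p.1) with
            | none => best
            | some t =>
              match best with
              | none => some (p.2 + t)
              | some b => if p.2 + t < b then some (p.2 + t) else best)
          none
      match best with
      | some b => total + b
      | none => total)
    0

-- ===== PRECONDITION & SPEC =====
def Spec_part1 (targets : List Int) (buttons : List (List Int)) (out : Int) : Prop := out = part1_alt targets buttons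
instance (targets : List Int) (buttons : List (List Int)) (out : Int) : Decidable (Spec_part1 targets buttons out) := by unfold Spec_part1; infer_instance

-- ===== CLAIM (what is proved, stated in full; the proofs are below) =====
def Claim_equal_part1 : Prop := ∀ (targets : List Int) (buttons : List (List Int)), Dom_part1 targets buttons → Spec_part1 targets buttons (part1 targets buttons)

-- ===== LEMMAS AND PROOFS =====

lemma bxor_natCast_negSucc (m n : Nat) : PySem.Int.bxor (m : Int) (Int.negSucc n) = Int.negSucc (m ^^^ n) := by
  simp [PySem.Int.bxor, Int.negSucc_eq]
  split_ifs with h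
  · omega
  · omega

lemma bxor_negSucc_natCast (m n : Nat) : PySem.Int.bxor (Int.negSucc m) (n : Int) = Int.negSucc (m ^^^ n) := by
  simp [PySem.Int.bxor, Int.negSucc_eq]
  split_ifs with h
  · omega
  · omega

lemma bxor_negSucc_negSucc (m n : Nat) : PySem.Int.bxor (Int.negSucc m) (Int.negSucc n) = ((m ^^^ n : Nat) : Int) := by
  simp [PySem.Int.bxor, Int.negSucc_eq]
  omega

lemma bxor_assoc (a b c : Int) : PySem.Int.bxor (PySem.Int.bxor a b) c = PySem.Int.bxor a (PySem.Int.bxor b c) := by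
  cases a <;> cases b <;> cases c <;>
    simp [PySem.Int.bxor_natCast, bxor_natCast_negSucc, bxor_negSucc_natCast, bxor_negSucc_negSucc, Nat.xor_assoc]

lemma bxor_cancel_left (t v : Int) : PySem.Int.bxor t (PySem.Int.bxor t v) = v := by
  rw [← bxor_assoc, PySem.Int.bxor_self, PySem.Int.bxor_comm, PySem.Int.bxor_zero]


lemma subsetXors_append (bs : List Int) (b : Int) :
    subsetXors (bs ++ [b]) = subsetXors bs ++ (subsetXors bs).map (fun p => (PySem.Int.bxor p.1 b, p.2 + 1)) := by
  simp [subsetXors, List.foldl_append]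

lemma mem_subsetXors (bs : List Int) (p : Int × Int) :
    p ∈ subsetXors bs ↔ ∃ c : List Int, c.Sublist bs ∧ c.foldl (fun a x => PySem.Int.bxor a x) 0 = p.1 ∧ (c.length : Int) = p.2 := by
  obtain ⟨pv, ps⟩ := p
  induction bs using List.reverseRecOn generalizing pv ps with
  | nil =>
    simp [subsetXors]
    omega
  | append_singleton bs b ih =>
    rw [subsetXors_append]
    simp only [List.mem_append, List.mem_map, ih]
    constructor
    · rintro (⟨c, hc, h1, h2⟩ | ⟨⟨qv, qs⟩, ⟨c, hc, h1, h2⟩, hqe⟩)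
      · exact ⟨c, hc.trans (List.sublist_append_left _ _), h1, h2⟩
      · simp only [Prod.mk.injEq] at hqe h1 h2
        refine ⟨c ++ [b], List.Sublist.append hc (List.Sublist.refl _), ?_, ?_⟩
        · simp [List.foldl_append, h1, hqe.1]
        · simp [← hqe.2, ← h2]
    · rintro ⟨c, hc, h1, h2⟩
      rcases List.sublist_append_iff.mp hc with ⟨c1, c2, rfl, hc1, hc2⟩
      rcases List.sublist_singleton.mp hc2 with rfl | rfl
      · left; exact ⟨c1, by simpa using hc1, by simpa using h1, by simpa using h2⟩
      · right
        refine ⟨(c1.foldl (fun a x => PySem.Int.bxor a x) 0, (c1.length : Int)), ⟨c1, hc1, rfl, rfl⟩, ?_⟩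
        simp only [List.foldl_append] at h1
        simp only [List.length_append, List.length_singleton] at h2
        simp only [Prod.mk.injEq]
        constructor
        · simpa using h1
        · simp at h2 ⊢
          omega

lemma min?_eq_of_cofinal (xs ys : List Int)
    (h1 : ∀ x ∈ xs, ∃ y ∈ ys, y ≤ x) (h2 : ∀ y ∈ ys, ∃ x ∈ xs, x ≤ y) :
    xs.min? = ys.min? := by
  cases hx : xs.min? with
  | none =>
    rw [List.min?_eq_none_iff] at hx
    subst hx
    cases hy : ys.min? with
    | none => rfl
    | some m =>
      rcases h2 _ (List.min?_eq_some_iff.mp hy).1 with ⟨x, hx, _⟩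
      simp at hx
  | some m1 =>
    obtain ⟨hm1, hlb1⟩ := List.min?_eq_some_iff.mp hx
    cases hy : ys.min? with
    | none =>
      rw [List.min?_eq_none_iff] at hy
      subst hy
      rcases h1 m1 hm1 with ⟨y, hy, _⟩
      simp at hy
    | some m2 =>
      obtain ⟨hm2, hlb2⟩ := List.min?_eq_some_iff.mp hy
      rcases h1 m1 hm1 with ⟨y, hyy, hy1⟩
      rcases h2 m2 hm2 with ⟨x, hxx, hx2⟩
      have := hlb2 y hyy
      have := hlb1 x hxx
      congr 1
      omega

lemma min?_append_singleton (xs : List Int) (x : Int) :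
    (xs ++ [x]).min? = some (match xs.min? with | none => x | some m => min m x) := by
  induction xs with
  | nil => simp
  | cons a l ih =>
    cases h : l.min? with
    | none =>
      rw [List.min?_eq_none_iff] at h
      subst h
      simp [List.min?_cons]
    | some m =>
      have hcons : a :: l ++ [x] = a :: (l ++ [x]) := rfl
      rw [hcons, List.min?_cons, List.min?_cons, ih, h]
      simp


lemma min?_of_pairwise_lt (l : List Int) (hl : l.Pairwise (· < ·)) : l.min? = l.head? := by
  cases l with
  | nil => rfl
  | cons a t =>
    rw [List.min?_cons]
    simp only [List.head?_cons, Option.some.injEq]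
    cases ht : t.min? with
    | none => simp
    | some m =>
      have hm := (List.min?_eq_some_iff.mp ht).1
      have : a < m := (List.pairwise_cons.mp hl).1 m hm
      simp
      omega

lemma find?_pairwise_min (l : List Int) (hl : l.Pairwise (· < ·)) (p : Int → Bool) :
    l.find? p = (l.filter p).min? := by
  rw [min?_of_pairwise_lt _ (hl.filter p), List.head?_filter]

lemma find?_congr_mem {α : Type} (l : List α) (p q : α → Bool) (h : ∀ x ∈ l, p x = q x) :
    l.find? p = l.find? q := by
  induction l with
  | nil => rfl
  | cons a t ih =>
    simp only [List.find?_cons]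
    rw [h a (by simp)]
    cases q a
    · exact ih (fun x hx => h x (by simp [hx]))
    · rfl

lemma subsetXors_size_bounds (bs : List Int) (p : Int × Int) (hp : p ∈ subsetXors bs) :
    0 ≤ p.2 ∧ p.2 ≤ (bs.length : Int) := by
  rcases (mem_subsetXors bs p).mp hp with ⟨c, hc, _, hlen⟩
  have := hc.length_le
  omega

def msList (t : Int) (bs : List Int) : List Int :=
  ((subsetXors bs).filter (fun p => p.1 == t)).map (·.2)

lemma mem_msList (t k : Int) (bs : List Int) :
    k ∈ msList t bs ↔ ∃ c : List Int, c.Sublist bs ∧ c.foldl (fun a x => PySem.Int.bxor a x) 0 = t ∧ (c.length : Int) = k := by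
  simp only [msList, List.mem_map, List.mem_filter, beq_iff_eq]
  constructor
  · rintro ⟨p, ⟨hp, hpt⟩, hpk⟩
    rcases (mem_subsetXors bs p).mp hp with ⟨c, hc, h1, h2⟩
    exact ⟨c, hc, by rw [h1, hpt], by rw [h2, hpk]⟩
  · rintro ⟨c, hc, h1, h2⟩
    exact ⟨(t, k), ⟨(mem_subsetXors bs (t, k)).mpr ⟨c, hc, h1, h2⟩, rfl⟩, rfl⟩

lemma msList_bounds (t : Int) (bs : List Int) (k : Int) (hk : k ∈ msList t bs) :
    0 ≤ k ∧ k ≤ (bs.length : Int) := by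
  simp only [msList, List.mem_map, List.mem_filter] at hk
  rcases hk with ⟨p, ⟨hp, _⟩, hpk⟩
  have := subsetXors_size_bounds bs p hp
  omega

lemma A_contrib (t : Int) (bs : List Int) :
    (PySem.List.pyRange 0 ((bs.length : Int) + 1) 1).find?
      (fun k => (PySem.List.combinations bs k.toNat).any
        (fun c => c.foldl (fun a x => PySem.Int.bxor a x) 0 == t))
    = (msList t bs).min? := by
  rw [find?_congr_mem _ _ (fun k => decide (k ∈ msList t bs)) ?hpred]
  case hpred =>
    intro k hk
    have hk' := (PySem.List.mem_pyRange_one.mp hk).1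
    rw [Bool.eq_iff_iff]
    simp only [List.any_eq_true, PySem.List.mem_combinations_iff, beq_iff_eq, decide_eq_true_eq,
      mem_msList]
    constructor
    · rintro ⟨c, ⟨hc, hlen⟩, hx⟩
      exact ⟨c, hc, hx, by omega⟩
    · rintro ⟨c, hc, hx, hlen⟩
      exact ⟨c, ⟨hc, by omega⟩, hx⟩
  rw [find?_pairwise_min _ (PySem.List.pairwise_lt_pyRange_one 0 ((bs.length : Int) + 1))]
  apply min?_eq_of_cofinal
  · intro x hx
    simp only [List.mem_filter, decide_eq_true_eq] at hx
    exact ⟨x, hx.2, le_refl x⟩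
  · intro y hy
    refine ⟨y, ?_, le_refl y⟩
    simp only [List.mem_filter, decide_eq_true_eq]
    have := msList_bounds t bs y hy
    exact ⟨PySem.List.mem_pyRange_one.mpr ⟨this.1, by omega⟩, hy⟩

lemma rbest_get (l : List (Int × Int)) (v : Int) :
    ((l.foldl
        (fun d p =>
          match d.get? p.1 with
          | none => d.insert p.1 p.2
          | some t => if p.2 < t then d.insert p.1 p.2 else d)
        PySem.Dict.empty).get? v)
      = ((l.filter (fun p => p.1 == v)).map (·.2)).min? := by
  induction l using List.reverseRecOn with
  | nil => simp [PySem.Dict.get?_empty]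
  | append_singleton l p ih =>
    rw [List.foldl_append]
    simp only [List.foldl_cons, List.foldl_nil]
    set d := l.foldl
        (fun d p =>
          match d.get? p.1 with
          | none => d.insert p.1 p.2
          | some t => if p.2 < t then d.insert p.1 p.2 else d)
        PySem.Dict.empty with hdd
    rw [List.filter_append, List.map_append]
    by_cases hv : p.1 = v
    · subst hv
      simp only [List.filter_cons, beq_self_eq_true, if_pos, List.filter_nil, List.map_cons,
        List.map_nil, min?_append_singleton, ← ih]
      cases hd : d.get? p.1 with
      | none => simp [PySem.Dict.get?_insert_self]
      | some t =>
        by_cases hlt : p.2 < t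
        · simp only [if_pos hlt, PySem.Dict.get?_insert_self, Option.some.injEq]
          omega
        · simp only [hd, if_neg hlt, Option.some.injEq]
          omega
    · have hne : ¬ (p.1 == v) = true := by simp [hv]
      have hfilter : List.filter (fun q => q.1 == v) [p] = [] := by simp [hne]
      rw [hfilter]
      simp only [List.map_nil, List.append_nil]
      cases hd : d.get? p.1 with
      | none =>
        rw [PySem.Dict.get?_insert_of_ne d p.2 (fun h => hv h.symm), ih]
      | some t =>
        by_cases hlt : p.2 < t
        · simp only [hlt, if_true]
          rw [PySem.Dict.get?_insert_of_ne d p.2 (fun h => hv h.symm), ih]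
        · simp only [hlt, if_false]
          rw [ih]

lemma best_fold (l : List (Int × Int)) (d : PySem.Dict Int Int) (t0 : Int) :
    (l.foldl
        (fun best p =>
          match d.get? (PySem.Int.bxor t0 p.1) with
          | none => best
          | some t =>
            match best with
            | none => some (p.2 + t)
            | some b => if p.2 + t < b then some (p.2 + t) else best)
        none)
      = (l.filterMap (fun p => (d.get? (PySem.Int.bxor t0 p.1)).map (fun s => p.2 + s))).min? := by
  induction l using List.reverseRecOn with
  | nil => simp
  | append_singleton l p ih =>
    rw [List.foldl_append, List.filterMap_append]
    simp only [List.foldl_cons, List.foldl_nil, List.filterMap_cons, List.filterMap_nil]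
    cases hg : d.get? (PySem.Int.bxor t0 p.1) with
    | none => simp only [Option.map_none, List.append_nil, ih]
    | some t =>
      simp only [Option.map_some, min?_append_singleton, ← ih]
      cases hb : l.foldl
          (fun best p =>
            match d.get? (PySem.Int.bxor t0 p.1) with
            | none => best
            | some t =>
              match best with
              | none => some (p.2 + t)
              | some b => if p.2 + t < b then some (p.2 + t) else best)
          none with
      | none => simp
      | some b =>
        by_cases hlt : p.2 + t < b
        · simp only [hlt, if_true, Option.some.injEq]
          omega
        · simp only [hlt, if_false, Option.some.injEq]
          omega

lemma foldl_bxor_shift (c : List Int) (a : Int) :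
    c.foldl (fun x y => PySem.Int.bxor x y) a = PySem.Int.bxor a (c.foldl (fun x y => PySem.Int.bxor x y) 0) := by
  induction c generalizing a with
  | nil => simp [PySem.Int.bxor_zero]
  | cons b c ih =>
    simp only [List.foldl_cons]
    rw [ih (PySem.Int.bxor a b), ih (PySem.Int.bxor 0 b), ← bxor_assoc]
    congr 1
    rw [PySem.Int.bxor_comm 0 b, PySem.Int.bxor_zero]

lemma foldl_bxor_append (c1 c2 : List Int) :
    (c1 ++ c2).foldl (fun x y => PySem.Int.bxor x y) 0
      = PySem.Int.bxor (c1.foldl (fun x y => PySem.Int.bxor x y) 0) (c2.foldl (fun x y => PySem.Int.bxor x y) 0) := by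
  rw [List.foldl_append, foldl_bxor_shift]

lemma combine_halves (t : Int) (L R : List Int) :
    ((subsetXors L).filterMap
        (fun p => ((((subsetXors R).filter (fun q => q.1 == PySem.Int.bxor t p.1)).map (·.2)).min?).map
          (fun s => p.2 + s))).min?
      = (msList t (L ++ R)).min? := by
  apply min?_eq_of_cofinal
  · intro x hx
    simp only [List.mem_filterMap, Option.map_eq_some_iff] at hx
    obtain ⟨p, hpL, s, hmin, rfl⟩ := hx
    have hsmem := (List.min?_eq_some_iff.mp hmin).1
    simp only [List.mem_map, List.mem_filter, beq_iff_eq] at hsmem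
    obtain ⟨q, ⟨hqR, hq1⟩, hq2⟩ := hsmem
    rcases (mem_subsetXors L p).mp hpL with ⟨c1, hc1, hx1, hl1⟩
    rcases (mem_subsetXors R q).mp hqR with ⟨c2, hc2, hx2, hl2⟩
    refine ⟨p.2 + s, ?_, le_refl _⟩
    rw [mem_msList]
    refine ⟨c1 ++ c2, hc1.append hc2, ?_, ?_⟩
    · rw [foldl_bxor_append, hx1, hx2, hq1, PySem.Int.bxor_comm t p.1, bxor_cancel_left]
    · simp only [List.length_append]
      push_cast
      omega
  · intro y hy
    rw [mem_msList] at hy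
    obtain ⟨c, hc, hx, hl⟩ := hy
    rcases List.sublist_append_iff.mp hc with ⟨c1, c2, rfl, hc1, hc2⟩
    rw [foldl_bxor_append] at hx
    set x1 := c1.foldl (fun x y => PySem.Int.bxor x y) 0 with hx1
    set x2 := c2.foldl (fun x y => PySem.Int.bxor x y) 0 with hx2
    have hq1 : x2 = PySem.Int.bxor t x1 := by
      rw [← hx, PySem.Int.bxor_comm x1 x2, bxor_assoc, PySem.Int.bxor_self, PySem.Int.bxor_zero]
    have hqmem : ((c2.length : Int)) ∈ ((subsetXors R).filter (fun q => q.1 == PySem.Int.bxor t x1)).map (·.2) := by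
      simp only [List.mem_map, List.mem_filter, beq_iff_eq]
      exact ⟨(x2, (c2.length : Int)), ⟨(mem_subsetXors R _).mpr ⟨c2, hc2, rfl, rfl⟩, hq1⟩, rfl⟩
    cases hmin : (((subsetXors R).filter (fun q => q.1 == PySem.Int.bxor t x1)).map (·.2)).min? with
    | none =>
      rw [List.min?_eq_none_iff] at hmin
      rw [hmin] at hqmem
      simp at hqmem
    | some s =>
      obtain ⟨-, hlb⟩ := List.min?_eq_some_iff.mp hmin
      refine ⟨(c1.length : Int) + s, ?_, ?_⟩
      · simp only [List.mem_filterMap, Option.map_eq_some_iff]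
        exact ⟨(x1, (c1.length : Int)), (mem_subsetXors L _).mpr ⟨c1, hc1, rfl, rfl⟩, s, hmin, rfl⟩
      · have := hlb _ hqmem
        simp only [List.length_append] at hl
        push_cast at hl
        omega

lemma contrib_eq (t : Int) (bs : List Int) :
    ((PySem.List.pyRange 0 ((bs.length : Int) + 1) 1).find?
      (fun k => (PySem.List.combinations bs k.toNat).any
        (fun c => c.foldl (fun a x => PySem.Int.bxor a x) 0 == t)))
    = ((subsetXors (PySem.List.slice bs none (some (PySem.Int.floordiv (bs.length : Int) 2)))).foldl
        (fun best p =>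
          match ((subsetXors (PySem.List.slice bs (some (PySem.Int.floordiv (bs.length : Int) 2)) none)).foldl
              (fun d q =>
                match d.get? q.1 with
                | none => d.insert q.1 q.2
                | some u => if q.2 < u then d.insert q.1 q.2 else d)
              PySem.Dict.empty).get? (PySem.Int.bxor t p.1) with
          | none => best
          | some u =>
            match best with
            | none => some (p.2 + u)
            | some b => if p.2 + u < b then some (p.2 + u) else best)
        none) := by
  have h0 : (0 : Int) ≤ PySem.Int.floordiv (bs.length : Int) 2 := by
    rw [PySem.Int.floordiv_eq_ediv_of_pos (by norm_num)]
    omega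
  rw [PySem.List.slice_to bs h0, PySem.List.slice_from bs h0]
  rw [A_contrib, best_fold]
  simp only [rbest_get]
  rw [combine_halves, List.take_append_drop]

-- ===== VERDICT (by name: the statement is the Claim_ definition above) =====
theorem part1_spec : Claim_equal_part1 := by
  intro targets buttons _
  unfold Spec_part1
  unfold part1 part1_alt
  apply PySem.List.foldl_congr_mem
  intro total tb _
  rw [contrib_eq tb.1 tb.2]
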